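-- pv_equiv track=rewrite | github.com/upayanchakraborty/Big-Five-Personality-Classification-Model- | app.py | get_personality_type
-- ===== SOURCE A (Python) =====
-- trait_cols = ['openness', 'conscientiousness', 'extraversion', 'agreeableness', 'neuroticism']
--
-- def get_personality_type(pred):
--     profile = {trait: pred[i] for i, trait in enumerate(trait_cols)}
--     o = profile['openness']
--     c = profile['conscientiousness']
--     e = profile['extraversion']
--     a = profile['agreeableness']
--     n = profile['neuroticism']
--
--     if e=='High' and a=='High' and n=='Low':
--         return 'The Leader',     'Charismatic, warm, and emotionally stable. Natural at bringing people together and inspiring those around them.'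
--     if o=='High' and e=='High' and a=='High':
--         return 'The Entertainer','Creative, sociable, and fun-loving. Thrives in social settings and brings energy wherever they go.'
--     if c=='High' and o=='High' and n=='Low':
--         return 'The Achiever',   'Disciplined, curious, and focused. Highly goal-oriented with a strong drive to learn and excel.'
--     if a=='High' and n=='Low' and e=='Low':
--         return 'The Caregiver',  'Empathetic, calm, and deeply supportive. Puts others first and brings stability to every relationship.'
--     if o=='High' and e=='Low' and c=='High':
--         return 'The Thinker',    'Intellectual, introspective, and methodical. Prefers the world of ideas and thrives in deep focus.'
--     if n=='High' and e=='Low' and a=='Low':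
--         return 'The Lone Wolf',  'Independent, intense, and private. Prefers depth over breadth and carves their own path.'
--     if c=='High' and a=='High' and e=='Low':
--         return 'The Defender',   'Reliable, kind, and hardworking. Quietly dedicated to doing what is right and caring for others.'
--     if o=='Low' and c=='Low' and e=='High':
--         return 'The Adventurer', 'Spontaneous, energetic, and thrill-seeking. Lives fully in the present moment.'
--     if o=='High' and a=='Low' and e=='High':
--         return 'The Debater',    'Bold, curious, and argumentative. Loves challenging ideas and never backs down from a discussion.'
--     return 'The Balanced', 'A well-rounded and adaptable personality. Comfortable across many different situations and social contexts.'
-- ===== SOURCE B (Python) =====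
-- # Precomputed decision-table implementation: each of the five traits is
-- # collapsed to one of three states (H/L/other), giving a 5-character key; the
-- # full 3^5 decision surface was enumerated once and the non-default outcomes
-- # stored below, so the call is a single dict lookup with no rule evaluation.
--
-- def _code(v):
--     return 'H' if v == 'High' else ('L' if v == 'Low' else '.')
--
-- TABLE = {
--     'HHHHH': 'The Entertainer',
--     'HHHHL': 'The Leader',
--     'HHHH.': 'The Entertainer',
--     'HHHLH': 'The Debater',
--     'HHHLL': 'The Achiever',
--     'HHHL.': 'The Debater',
--     'HHH.L': 'The Achiever',
--     'HHLHH': 'The Thinker',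
--     'HHLHL': 'The Achiever',
--     'HHLH.': 'The Thinker',
--     'HHLLH': 'The Thinker',
--     'HHLLL': 'The Achiever',
--     'HHLL.': 'The Thinker',
--     'HHL.H': 'The Thinker',
--     'HHL.L': 'The Achiever',
--     'HHL..': 'The Thinker',
--     'HH.HL': 'The Achiever',
--     'HH.LL': 'The Achiever',
--     'HH..L': 'The Achiever',
--     'HLHHH': 'The Entertainer',
--     'HLHHL': 'The Leader',
--     'HLHH.': 'The Entertainer',
--     'HLHLH': 'The Debater',
--     'HLHLL': 'The Debater',
--     'HLHL.': 'The Debater',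
--     'HLLHL': 'The Caregiver',
--     'HLLLH': 'The Lone Wolf',
--     'H.HHH': 'The Entertainer',
--     'H.HHL': 'The Leader',
--     'H.HH.': 'The Entertainer',
--     'H.HLH': 'The Debater',
--     'H.HLL': 'The Debater',
--     'H.HL.': 'The Debater',
--     'H.LHL': 'The Caregiver',
--     'H.LLH': 'The Lone Wolf',
--     'LHHHL': 'The Leader',
--     'LHLHH': 'The Defender',
--     'LHLHL': 'The Caregiver',
--     'LHLH.': 'The Defender',
--     'LHLLH': 'The Lone Wolf',
--     'LLHHH': 'The Adventurer',
--     'LLHHL': 'The Leader',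
--     'LLHH.': 'The Adventurer',
--     'LLHLH': 'The Adventurer',
--     'LLHLL': 'The Adventurer',
--     'LLHL.': 'The Adventurer',
--     'LLH.H': 'The Adventurer',
--     'LLH.L': 'The Adventurer',
--     'LLH..': 'The Adventurer',
--     'LLLHL': 'The Caregiver',
--     'LLLLH': 'The Lone Wolf',
--     'L.HHL': 'The Leader',
--     'L.LHL': 'The Caregiver',
--     'L.LLH': 'The Lone Wolf',
--     '.HHHL': 'The Leader',
--     '.HLHH': 'The Defender',
--     '.HLHL': 'The Caregiver',
--     '.HLH.': 'The Defender',
--     '.HLLH': 'The Lone Wolf',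
--     '.LHHL': 'The Leader',
--     '.LLHL': 'The Caregiver',
--     '.LLLH': 'The Lone Wolf',
--     '..HHL': 'The Leader',
--     '..LHL': 'The Caregiver',
--     '..LLH': 'The Lone Wolf',
-- }
-- DESC = {
--     'The Entertainer': 'Creative, sociable, and fun-loving. Thrives in social settings and brings energy wherever they go.',
--     'The Leader': 'Charismatic, warm, and emotionally stable. Natural at bringing people together and inspiring those around them.',
--     'The Debater': 'Bold, curious, and argumentative. Loves challenging ideas and never backs down from a discussion.',
--     'The Achiever': 'Disciplined, curious, and focused. Highly goal-oriented with a strong drive to learn and excel.',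
--     'The Balanced': 'A well-rounded and adaptable personality. Comfortable across many different situations and social contexts.',
--     'The Thinker': 'Intellectual, introspective, and methodical. Prefers the world of ideas and thrives in deep focus.',
--     'The Caregiver': 'Empathetic, calm, and deeply supportive. Puts others first and brings stability to every relationship.',
--     'The Lone Wolf': 'Independent, intense, and private. Prefers depth over breadth and carves their own path.',
--     'The Defender': 'Reliable, kind, and hardworking. Quietly dedicated to doing what is right and caring for others.',
--     'The Adventurer': 'Spontaneous, energetic, and thrill-seeking. Lives fully in the present moment.',
-- }
--
--
-- def get_personality_type(pred):
--     key = ''.join(_code(pred[i]) for i in range(5))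
--     name = TABLE.get(key, 'The Balanced')
--     return name, DESC[name]
-- ===== Notes on version B (the rewrite author's own statement) =====
-- stated objective: alternative
-- what changed: Replaces rule evaluation entirely: each trait is collapsed to one of three states (High/Low/other) forming a 5-character key, and the whole 3^5 decision surface is precomputed into a literal lookup table, so a call is a single dict lookup instead of evaluating any trait conditions.
import Mathlib
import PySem

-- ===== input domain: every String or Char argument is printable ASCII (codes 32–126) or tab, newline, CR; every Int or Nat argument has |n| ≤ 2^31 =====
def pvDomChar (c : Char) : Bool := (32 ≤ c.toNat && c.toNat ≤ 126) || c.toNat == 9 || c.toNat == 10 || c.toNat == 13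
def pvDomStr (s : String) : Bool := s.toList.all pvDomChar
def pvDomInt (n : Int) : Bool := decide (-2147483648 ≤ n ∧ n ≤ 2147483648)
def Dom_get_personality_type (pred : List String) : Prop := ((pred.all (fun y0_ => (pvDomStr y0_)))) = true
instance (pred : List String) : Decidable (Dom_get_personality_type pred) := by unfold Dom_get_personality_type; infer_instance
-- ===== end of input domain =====

-- B replaces A's rule evaluation by a precomputed decision table: each trait is collapsed
-- to H/L/other, and the resulting 5-character key is looked up in a table enumerating the
-- whole 3^5 decision surface (objective: alternative). Return values only; no mutation.

-- ===== PORT A =====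
def pvTraitCols : List String :=
  ["openness", "conscientiousness", "extraversion", "agreeableness", "neuroticism"]

-- pred[i] raises IndexError when out of range (excluded by Pre_); .getD "" is never reached inside Pre_.
def get_personality_type (pred : List String) : String × String :=
  let profile : PySem.Dict String String :=
    (PySem.List.enumerate pvTraitCols).foldl
      (fun d it => d.insert it.2 ((PySem.List.pyGet? pred it.1).getD ""))
      PySem.Dict.empty
  let o := profile.getD "openness" ""
  let c := profile.getD "conscientiousness" ""
  let e := profile.getD "extraversion" ""
  let a := profile.getD "agreeableness" ""
  let n := profile.getD "neuroticism" ""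
  if e == "High" && a == "High" && n == "Low" then
    ("The Leader", "Charismatic, warm, and emotionally stable. Natural at bringing people together and inspiring those around them.")
  else if o == "High" && e == "High" && a == "High" then
    ("The Entertainer", "Creative, sociable, and fun-loving. Thrives in social settings and brings energy wherever they go.")
  else if c == "High" && o == "High" && n == "Low" then
    ("The Achiever", "Disciplined, curious, and focused. Highly goal-oriented with a strong drive to learn and excel.")
  else if a == "High" && n == "Low" && e == "Low" then
    ("The Caregiver", "Empathetic, calm, and deeply supportive. Puts others first and brings stability to every relationship.")
  else if o == "High" && e == "Low" && c == "High" then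
    ("The Thinker", "Intellectual, introspective, and methodical. Prefers the world of ideas and thrives in deep focus.")
  else if n == "High" && e == "Low" && a == "Low" then
    ("The Lone Wolf", "Independent, intense, and private. Prefers depth over breadth and carves their own path.")
  else if c == "High" && a == "High" && e == "Low" then
    ("The Defender", "Reliable, kind, and hardworking. Quietly dedicated to doing what is right and caring for others.")
  else if o == "Low" && c == "Low" && e == "High" then
    ("The Adventurer", "Spontaneous, energetic, and thrill-seeking. Lives fully in the present moment.")
  else if o == "High" && a == "Low" && e == "High" then
    ("The Debater", "Bold, curious, and argumentative. Loves challenging ideas and never backs down from a discussion.")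
  else
    ("The Balanced", "A well-rounded and adaptable personality. Comfortable across many different situations and social contexts.")

-- ===== PORT B =====
def pvTable : PySem.Dict String String := PySem.Dict.ofList
  [ ("HHHHH", "The Entertainer"),
    ("HHHHL", "The Leader"),
    ("HHHH.", "The Entertainer"),
    ("HHHLH", "The Debater"),
    ("HHHLL", "The Achiever"),
    ("HHHL.", "The Debater"),
    ("HHH.L", "The Achiever"),
    ("HHLHH", "The Thinker"),
    ("HHLHL", "The Achiever"),
    ("HHLH.", "The Thinker"),
    ("HHLLH", "The Thinker"),
    ("HHLLL", "The Achiever"),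
    ("HHLL.", "The Thinker"),
    ("HHL.H", "The Thinker"),
    ("HHL.L", "The Achiever"),
    ("HHL..", "The Thinker"),
    ("HH.HL", "The Achiever"),
    ("HH.LL", "The Achiever"),
    ("HH..L", "The Achiever"),
    ("HLHHH", "The Entertainer"),
    ("HLHHL", "The Leader"),
    ("HLHH.", "The Entertainer"),
    ("HLHLH", "The Debater"),
    ("HLHLL", "The Debater"),
    ("HLHL.", "The Debater"),
    ("HLLHL", "The Caregiver"),
    ("HLLLH", "The Lone Wolf"),
    ("H.HHH", "The Entertainer"),
    ("H.HHL", "The Leader"),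
    ("H.HH.", "The Entertainer"),
    ("H.HLH", "The Debater"),
    ("H.HLL", "The Debater"),
    ("H.HL.", "The Debater"),
    ("H.LHL", "The Caregiver"),
    ("H.LLH", "The Lone Wolf"),
    ("LHHHL", "The Leader"),
    ("LHLHH", "The Defender"),
    ("LHLHL", "The Caregiver"),
    ("LHLH.", "The Defender"),
    ("LHLLH", "The Lone Wolf"),
    ("LLHHH", "The Adventurer"),
    ("LLHHL", "The Leader"),
    ("LLHH.", "The Adventurer"),
    ("LLHLH", "The Adventurer"),
    ("LLHLL", "The Adventurer"),
    ("LLHL.", "The Adventurer"),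
    ("LLH.H", "The Adventurer"),
    ("LLH.L", "The Adventurer"),
    ("LLH..", "The Adventurer"),
    ("LLLHL", "The Caregiver"),
    ("LLLLH", "The Lone Wolf"),
    ("L.HHL", "The Leader"),
    ("L.LHL", "The Caregiver"),
    ("L.LLH", "The Lone Wolf"),
    (".HHHL", "The Leader"),
    (".HLHH", "The Defender"),
    (".HLHL", "The Caregiver"),
    (".HLH.", "The Defender"),
    (".HLLH", "The Lone Wolf"),
    (".LHHL", "The Leader"),
    (".LLHL", "The Caregiver"),
    (".LLLH", "The Lone Wolf"),
    ("..HHL", "The Leader"),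
    ("..LHL", "The Caregiver"),
    ("..LLH", "The Lone Wolf") ]

def pvDesc : PySem.Dict String String := PySem.Dict.ofList
  [ ("The Entertainer", "Creative, sociable, and fun-loving. Thrives in social settings and brings energy wherever they go."),
    ("The Leader", "Charismatic, warm, and emotionally stable. Natural at bringing people together and inspiring those around them."),
    ("The Debater", "Bold, curious, and argumentative. Loves challenging ideas and never backs down from a discussion."),
    ("The Achiever", "Disciplined, curious, and focused. Highly goal-oriented with a strong drive to learn and excel."),
    ("The Balanced", "A well-rounded and adaptable personality. Comfortable across many different situations and social contexts."),
    ("The Thinker", "Intellectual, introspective, and methodical. Prefers the world of ideas and thrives in deep focus."),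
    ("The Caregiver", "Empathetic, calm, and deeply supportive. Puts others first and brings stability to every relationship."),
    ("The Lone Wolf", "Independent, intense, and private. Prefers depth over breadth and carves their own path."),
    ("The Defender", "Reliable, kind, and hardworking. Quietly dedicated to doing what is right and caring for others."),
    ("The Adventurer", "Spontaneous, energetic, and thrill-seeking. Lives fully in the present moment.") ]

def pvCode (v : String) : String :=
  if v == "High" then "H" else if v == "Low" then "L" else "."

-- pred[i] raises IndexError when out of range (excluded by Pre_); .getD "" is never reached inside Pre_.
def get_personality_type_alt (pred : List String) : String × String :=
  let key := String.join ((PySem.List.pyRange 0 5 1).map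
    (fun i => pvCode ((PySem.List.pyGet? pred i).getD "")))
  let name := pvTable.getD key "The Balanced"
  -- DESC[name]: name is always a key of pvDesc (table values plus the default), so
  -- Python's DESC[name] never raises; the getD fallback "" is unreachable.
  (name, pvDesc.getD name "")

-- ===== PRECONDITION & SPEC =====
-- Pre_ excludes only inputs with fewer than 5 entries, on which Python A raises IndexError (pred[i]).
def Pre_get_personality_type (pred : List String) : Prop := 5 ≤ pred.length
instance (pred : List String) : Decidable (Pre_get_personality_type pred) := by
  unfold Pre_get_personality_type; infer_instance

def pvWitness_get_personality_type : List String := ["High", "High", "High", "High", "Low"]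

def Spec_get_personality_type (pred : List String) (out : String × String) : Prop := out = get_personality_type_alt pred
instance (pred : List String) (out : String × String) : Decidable (Spec_get_personality_type pred out) := by unfold Spec_get_personality_type; infer_instance

-- ===== CLAIM (what is proved, stated in full; the proofs are below) =====
def Claim_equal_get_personality_type : Prop := ∀ (pred : List String), Dom_get_personality_type pred → Pre_get_personality_type pred → Spec_get_personality_type pred (get_personality_type pred)

-- ===== LEMMAS AND PROOFS =====
-- Proof skeleton: both ports depend on each trait string only through its three-way
-- classification (High / Low / other); PvTrit names that classification, pvChainA /
-- pvLookupB are the two ports expressed over it, and the 3^5-case bridge is by decide.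
inductive PvTrit : Type
  | hi | lo | ot
deriving DecidableEq, Repr

def pvCls (s : String) : PvTrit :=
  if s = "High" then .hi else if s = "Low" then .lo else .ot

def pvCodeT : PvTrit → String
  | .hi => "H"
  | .lo => "L"
  | .ot => "."

def pvChainA (o c e a n : PvTrit) : String × String :=
  if e == .hi && a == .hi && n == .lo then
    ("The Leader", "Charismatic, warm, and emotionally stable. Natural at bringing people together and inspiring those around them.")
  else if o == .hi && e == .hi && a == .hi then
    ("The Entertainer", "Creative, sociable, and fun-loving. Thrives in social settings and brings energy wherever they go.")
  else if c == .hi && o == .hi && n == .lo then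
    ("The Achiever", "Disciplined, curious, and focused. Highly goal-oriented with a strong drive to learn and excel.")
  else if a == .hi && n == .lo && e == .lo then
    ("The Caregiver", "Empathetic, calm, and deeply supportive. Puts others first and brings stability to every relationship.")
  else if o == .hi && e == .lo && c == .hi then
    ("The Thinker", "Intellectual, introspective, and methodical. Prefers the world of ideas and thrives in deep focus.")
  else if n == .hi && e == .lo && a == .lo then
    ("The Lone Wolf", "Independent, intense, and private. Prefers depth over breadth and carves their own path.")
  else if c == .hi && a == .hi && e == .lo then
    ("The Defender", "Reliable, kind, and hardworking. Quietly dedicated to doing what is right and caring for others.")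
  else if o == .lo && c == .lo && e == .hi then
    ("The Adventurer", "Spontaneous, energetic, and thrill-seeking. Lives fully in the present moment.")
  else if o == .hi && a == .lo && e == .hi then
    ("The Debater", "Bold, curious, and argumentative. Loves challenging ideas and never backs down from a discussion.")
  else
    ("The Balanced", "A well-rounded and adaptable personality. Comfortable across many different situations and social contexts.")

def pvLookupB (o c e a n : PvTrit) : String × String :=
  let key := String.join [pvCodeT o, pvCodeT c, pvCodeT e, pvCodeT a, pvCodeT n]
  let name := pvTable.getD key "The Balanced"
  (name, pvDesc.getD name "")

theorem pvCls_hi (s : String) : (s == "High") = (pvCls s == PvTrit.hi) := by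
  simp only [pvCls]; split_ifs <;> simp [*]
theorem pvCls_lo (s : String) : (s == "Low") = (pvCls s == PvTrit.lo) := by
  simp only [pvCls]; split_ifs <;> simp [*]
theorem pvCode_eq (s : String) : pvCode s = pvCodeT (pvCls s) := by
  simp only [pvCode, pvCls, beq_iff_eq]; split_ifs <;> rfl

set_option maxHeartbeats 4000000 in
set_option maxRecDepth 100000 in
theorem pv_bridge : ∀ o c e a n : PvTrit, pvChainA o c e a n = pvLookupB o c e a n := by
  intro o c e a n
  cases o <;> cases c <;> cases e <;> cases a <;> cases n <;> decide

theorem pvA_eq (o c e a n : String) (rest : List String) :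
    get_personality_type (o :: c :: e :: a :: n :: rest) =
      pvChainA (pvCls o) (pvCls c) (pvCls e) (pvCls a) (pvCls n) := by
  have h1 : PySem.List.pyGet? (o :: c :: e :: a :: n :: rest) (1 : Int) = some c := by
    rw [show (1 : Int) = ((1 : Nat) : Int) by norm_num, PySem.List.pyGet?_natCast]; rfl
  have h2 : PySem.List.pyGet? (o :: c :: e :: a :: n :: rest) (2 : Int) = some e := by
    rw [show (2 : Int) = ((2 : Nat) : Int) by norm_num, PySem.List.pyGet?_natCast]; rfl
  have h3 : PySem.List.pyGet? (o :: c :: e :: a :: n :: rest) (3 : Int) = some a := by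
    rw [show (3 : Int) = ((3 : Nat) : Int) by norm_num, PySem.List.pyGet?_natCast]; rfl
  have h4 : PySem.List.pyGet? (o :: c :: e :: a :: n :: rest) (4 : Int) = some n := by
    rw [show (4 : Int) = ((4 : Nat) : Int) by norm_num, PySem.List.pyGet?_natCast]; rfl
  simp only [get_personality_type, pvTraitCols, PySem.List.enumerate_cons,
    PySem.List.enumerate_nil, List.foldl, pvChainA]
  simp [PySem.Dict.getD_eq_get?_getD, PySem.Dict.get?_mk_cons, PySem.Dict.insert,
    PySem.Dict.empty, h1, h2, h3, h4, pvCls_hi, pvCls_lo]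

theorem pvB_eq (o c e a n : String) (rest : List String) :
    get_personality_type_alt (o :: c :: e :: a :: n :: rest) =
      pvLookupB (pvCls o) (pvCls c) (pvCls e) (pvCls a) (pvCls n) := by
  have h0 : PySem.List.pyGet? (o :: c :: e :: a :: n :: rest) (0 : Int) = some o := by
    rw [show (0 : Int) = ((0 : Nat) : Int) by norm_num, PySem.List.pyGet?_natCast]; rfl
  have h1 : PySem.List.pyGet? (o :: c :: e :: a :: n :: rest) (1 : Int) = some c := by
    rw [show (1 : Int) = ((1 : Nat) : Int) by norm_num, PySem.List.pyGet?_natCast]; rfl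
  have h2 : PySem.List.pyGet? (o :: c :: e :: a :: n :: rest) (2 : Int) = some e := by
    rw [show (2 : Int) = ((2 : Nat) : Int) by norm_num, PySem.List.pyGet?_natCast]; rfl
  have h3 : PySem.List.pyGet? (o :: c :: e :: a :: n :: rest) (3 : Int) = some a := by
    rw [show (3 : Int) = ((3 : Nat) : Int) by norm_num, PySem.List.pyGet?_natCast]; rfl
  have h4 : PySem.List.pyGet? (o :: c :: e :: a :: n :: rest) (4 : Int) = some n := by
    rw [show (4 : Int) = ((4 : Nat) : Int) by norm_num, PySem.List.pyGet?_natCast]; rfl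
  rw [get_personality_type_alt,
    show PySem.List.pyRange 0 5 1 = [0, 1, 2, 3, 4] from by decide]
  simp only [List.map, h0, h1, h2, h3, h4, Option.getD_some, pvCode_eq, pvLookupB]

theorem pv_agree (o c e a n : String) (rest : List String) :
    get_personality_type (o :: c :: e :: a :: n :: rest) =
      get_personality_type_alt (o :: c :: e :: a :: n :: rest) := by
  rw [pvA_eq, pvB_eq]; exact pv_bridge _ _ _ _ _

-- ===== VERDICT (by name: the statement is the Claim_ definition above) =====
theorem get_personality_type_spec : Claim_equal_get_personality_type := by
  intro pred _ hpre
  unfold Pre_get_personality_type at hpre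
  match pred, hpre with
  | o :: c :: e :: a :: n :: rest, _ => exact pv_agree o c e a n rest
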